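-- pv_equiv track=rewrite | github.com/discordforge/discordforge-py | discordforge/ratelimit.py | _resolve_route
-- ===== SOURCE A (Python) =====
-- _KNOWN_LIMITS: dict[str, tuple[int, float]] = {
--     "POST:/api/bots/stats": (1, 300.0),  # 1 req / 5 min
--     "GET:/api/bots/{bot_id}/votes/check": (60, 60.0),  # 60 req / min
-- }
--
-- def _resolve_route(route: str) -> str:
--     # Normalise parameterised routes like GET:/api/bots/123/votes/check
--     # back to the known-limit key with a placeholder.
--     for known in _KNOWN_LIMITS:
--         parts_known = known.split("/")
--         parts_route = route.split("/")
--         if len(parts_known) != len(parts_route):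
--             continue
--         if all(
--             k == r or k.startswith("{") for k, r in zip(parts_known, parts_route, strict=False)
--         ):
--             return known
--     return route
-- ===== SOURCE B (Python) =====
-- def _resolve_route(route: str) -> str:
--     # Table constant-folded into direct structural pattern tests on a single split.
--     match route.split("/"):
--         case ["POST:", "api", "bots", "stats"]:
--             return "POST:/api/bots/stats"
--         case ["GET:", "api", "bots", _, "votes", "check"]:
--             return "GET:/api/bots/{bot_id}/votes/check"
--         case _:
--             return route
-- ===== Notes on version B (the rewrite author's own statement) =====
-- stated objective: simpler
-- what changed: replaces A's loop over the _KNOWN_LIMITS dict with per-key re-splitting and zip/all segment comparison by the table constant-folded into two direct structural pattern matches on a single split of the route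
import Mathlib
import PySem

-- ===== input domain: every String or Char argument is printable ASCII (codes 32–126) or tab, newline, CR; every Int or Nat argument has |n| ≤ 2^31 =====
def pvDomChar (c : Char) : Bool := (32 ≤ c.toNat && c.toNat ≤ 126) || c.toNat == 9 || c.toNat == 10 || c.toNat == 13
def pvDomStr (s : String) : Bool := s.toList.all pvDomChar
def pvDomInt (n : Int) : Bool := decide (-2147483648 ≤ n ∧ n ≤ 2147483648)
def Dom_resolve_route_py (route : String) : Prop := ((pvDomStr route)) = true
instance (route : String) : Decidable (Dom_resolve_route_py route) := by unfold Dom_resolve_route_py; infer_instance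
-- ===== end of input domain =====

-- B replaces A's loop over the _KNOWN_LIMITS dict (re-splitting each key and zip/all
-- comparing segments) by the table constant-folded into two direct structural pattern
-- tests on a single split of the route (objective: simpler).

-- ===== PORT A =====
-- the keys of _KNOWN_LIMITS, in insertion order
def pvKnownKeys : List String := ["POST:/api/bots/stats", "GET:/api/bots/{bot_id}/votes/check"]

-- the 'for known in _KNOWN_LIMITS' loop of A
-- route.split("/"): sep "/" is non-empty, so PySem.Str.split? always returns some
def pvSplit (s : String) : List String := (PySem.Str.split? s "/").getD []

def pvALoop : List String → String → String
  | [], route => route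
  | known :: rest, route =>
    let parts_known := pvSplit known
    let parts_route := pvSplit route
    if parts_known.length ≠ parts_route.length then pvALoop rest route
    else if (parts_known.zip parts_route).all
        (fun kr => kr.1 == kr.2 || PySem.Str.startswith kr.1 "{") then known
    else pvALoop rest route

def resolve_route_py (route : String) : String := pvALoop pvKnownKeys route

-- ===== PORT B =====
def resolve_route_py_alt (route : String) : String :=
  match pvSplit route with
  | ["POST:", "api", "bots", "stats"] => "POST:/api/bots/stats"
  | ["GET:", "api", "bots", _, "votes", "check"] => "GET:/api/bots/{bot_id}/votes/check"
  | _ => route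

-- ===== PRECONDITION & SPEC =====
def Spec_resolve_route_py (route : String) (out : String) : Prop := out = resolve_route_py_alt route
instance (route : String) (out : String) : Decidable (Spec_resolve_route_py route out) := by unfold Spec_resolve_route_py; infer_instance

-- ===== CLAIM (what is proved, stated in full; the proofs are below) =====
def Claim_equal_resolve_route_py : Prop := ∀ (route : String), Dom_resolve_route_py route → Spec_resolve_route_py route (resolve_route_py route)

-- ===== LEMMAS AND PROOFS =====
lemma pv_split_key1 : pvSplit "POST:/api/bots/stats" = ["POST:", "api", "bots", "stats"] := by decide

lemma pv_split_key2 : pvSplit "GET:/api/bots/{bot_id}/votes/check" =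
    ["GET:", "api", "bots", "{bot_id}", "votes", "check"] := by decide

lemma pv_main (route : String) : resolve_route_py route = resolve_route_py_alt route := by
  unfold resolve_route_py resolve_route_py_alt pvKnownKeys
  simp only [pvALoop, pv_split_key1, pv_split_key2]
  generalize pvSplit route = ps
  rcases ps with _ | ⟨a, _ | ⟨b, _ | ⟨c, _ | ⟨d, _ | ⟨e, _ | ⟨f, _ | ⟨g, t⟩⟩⟩⟩⟩⟩⟩ <;>
    simp [List.zip, List.all, PySem.Str.startswith, PySem.Chars.startswith] <;>
    split_ifs <;> (try simp_all) <;> (split <;> simp_all)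

-- ===== VERDICT (by name: the statement is the Claim_ definition above) =====
theorem resolve_route_py_spec : Claim_equal_resolve_route_py := by
  intro route _
  unfold Spec_resolve_route_py
  exact pv_main route
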